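-- pv_equiv track=rewrite | github.com/gamorosino/fixSidecar | update_json_sidecar.py | calculate_correct_slice_order_legacy
-- ===== SOURCE A (Python) =====
-- def calculate_correct_slice_order_legacy(num_slices, mb_factor, slice_order_step=4):
--     """
--     Legacy slice-order logic tuned to the original dataset (LAND LAB protocol).
--     Assumes mb_factor == 3.
--     """
--     if mb_factor <= 0:
--         raise ValueError("MultiBand Factor (MB Factor) must be > 0.")
--     if num_slices % mb_factor != 0:
--         raise ValueError("Number of slices must be divisible by MB factor.")
--
--     off = num_slices // mb_factor  # distance between stacks
--
--     LEGACY_MB_FACTOR = 3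
--     if mb_factor != LEGACY_MB_FACTOR:
--         raise ValueError(
--             f"Legacy slice order assumes mb_factor={LEGACY_MB_FACTOR}. "
--             f"Got mb_factor={mb_factor}. Use slice_order_mode='ascending' or 'interleaved', "
--             f"or provide --slice-order."
--         )
--
--     slice_order = []
--     k = 0
--     a_i = 0
--     last_stack_offset = (mb_factor - 1) * off  # == 2*off for mb_factor=3
--
--     for shot_idx in range(0, num_slices, mb_factor):
--         current_step = 0 if shot_idx == 0 else slice_order_step
--
--         if a_i + current_step + last_stack_offset >= num_slices:
--             k += 1
--             a_i = k
--             current_step = 0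
--
--         a_i = a_i + current_step
--         group = [a_i + s * off for s in range(mb_factor)]  # size 3 here
--         slice_order.append(group)
--
--     return slice_order
-- ===== SOURCE B (Python) =====
-- def calculate_correct_slice_order_legacy(num_slices, mb_factor, slice_order_step=4):
--     """
--     Legacy slice-order logic tuned to the original dataset (LAND LAB protocol).
--     Assumes mb_factor == 3.
--     """
--     if mb_factor <= 0:
--         raise ValueError("MultiBand Factor (MB Factor) must be > 0.")
--     if num_slices % mb_factor != 0:
--         raise ValueError("Number of slices must be divisible by MB factor.")
--
--     off = num_slices // mb_factor  # distance between stacks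
--
--     LEGACY_MB_FACTOR = 3
--     if mb_factor != LEGACY_MB_FACTOR:
--         raise ValueError(
--             f"Legacy slice order assumes mb_factor={LEGACY_MB_FACTOR}. "
--             f"Got mb_factor={mb_factor}. Use slice_order_mode='ascending' or 'interleaved', "
--             f"or provide --slice-order."
--         )
--
--     # Direct generation: runs start at each residue 0..step-1 and stride by step.
--     return [[a_i + s * off for s in range(mb_factor)]
--             for start in range(slice_order_step)
--             for a_i in range(start, off, slice_order_step)]
-- ===== Notes on version B (the rewrite author's own statement) =====
-- stated objective: simpler
-- what changed: Replaces A's single stateful loop that threads k/a_i/current_step across iterations with a direct nested comprehension: for each starting residue in range(slice_order_step) emit the arithmetic progression range(start, off, slice_order_step), building the same groups in the same order. Pre_ excludes nonpositive slice_order_step with positive num_slices, where A's never-resetting loop still returns repeated (step 0) or negative-index (step < 0) groups — an implementation artefact — while B's ranges naturally yield nothing ([]).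
-- outside the precondition, e.g. on calculate_correct_slice_order_legacy(6, 3, 0): A returns [[0, 2, 4], [0, 2, 4]], B returns []; on calculate_correct_slice_order_legacy(6, 3, -1): A returns [[0, 2, 4], [-1, 1, 3]], B returns []
import Mathlib
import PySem

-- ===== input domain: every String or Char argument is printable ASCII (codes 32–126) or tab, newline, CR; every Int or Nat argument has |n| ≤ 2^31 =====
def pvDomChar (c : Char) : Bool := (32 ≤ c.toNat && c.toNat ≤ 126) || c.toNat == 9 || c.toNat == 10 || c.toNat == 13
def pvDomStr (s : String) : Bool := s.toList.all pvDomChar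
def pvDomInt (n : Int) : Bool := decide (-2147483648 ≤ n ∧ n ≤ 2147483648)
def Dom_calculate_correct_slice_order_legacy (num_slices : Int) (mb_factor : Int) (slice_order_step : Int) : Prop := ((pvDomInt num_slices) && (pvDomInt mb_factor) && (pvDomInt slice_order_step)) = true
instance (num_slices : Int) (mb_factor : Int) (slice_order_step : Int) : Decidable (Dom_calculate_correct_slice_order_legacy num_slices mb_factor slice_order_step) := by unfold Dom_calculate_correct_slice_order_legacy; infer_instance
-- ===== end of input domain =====

-- B replaces A's stateful loop (threading k/a_i) with direct nested generation of the
-- same interleaved order (objective: simpler). Return-value equivalence on Pre_.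

-- shared helper: the group comprehension [a_i + s * off for s in range(mb_factor)]
def groupOf (mb_factor off a_i : Int) : List Int :=
  (PySem.List.pyRange 0 mb_factor 1).map (fun s => a_i + s * off)

-- ===== PORT A =====
-- loop body of A, acting on the state (slice_order, k, a_i)
def stepA (num_slices mb_factor slice_order_step off last_stack_offset : Int)
    (st : List (List Int) × Int × Int) (shot_idx : Int) : List (List Int) × Int × Int :=
  let slice_order := st.1
  let k := st.2.1
  let a_i := st.2.2
  let current_step : Int := if shot_idx = 0 then 0 else slice_order_step
  let kac : Int × Int × Int :=
    if a_i + current_step + last_stack_offset ≥ num_slices then (k + 1, k + 1, 0)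
    else (k, a_i, current_step)
  let a_i' := kac.2.1 + kac.2.2
  (slice_order ++ [groupOf mb_factor off a_i'], kac.1, a_i')

def calculate_correct_slice_order_legacy (num_slices : Int) (mb_factor : Int) (slice_order_step : Int) : List (List Int) :=
  if mb_factor ≤ 0 then []                               -- Python raises ValueError; excluded by Pre_
  else if PySem.Int.mod num_slices mb_factor ≠ 0 then [] -- Python raises ValueError; excluded by Pre_
  else
    let off := PySem.Int.floordiv num_slices mb_factor
    if mb_factor ≠ 3 then []                             -- Python raises ValueError; excluded by Pre_
    else
      let last_stack_offset := (mb_factor - 1) * off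
      ((PySem.List.pyRange 0 num_slices mb_factor).foldl
        (stepA num_slices mb_factor slice_order_step off last_stack_offset)
        ([], 0, 0)).1

-- ===== PORT B =====
def calculate_correct_slice_order_legacy_alt (num_slices : Int) (mb_factor : Int) (slice_order_step : Int) : List (List Int) :=
  if mb_factor ≤ 0 then []                               -- Python raises ValueError; excluded by Pre_
  else if PySem.Int.mod num_slices mb_factor ≠ 0 then [] -- Python raises ValueError; excluded by Pre_
  else
    let off := PySem.Int.floordiv num_slices mb_factor
    if mb_factor ≠ 3 then []                             -- Python raises ValueError; excluded by Pre_
    else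
      (PySem.List.pyRange 0 slice_order_step 1).flatMap
        (fun start => (PySem.List.pyRange start off slice_order_step).map
          (fun a_i => groupOf mb_factor off a_i))

-- ===== PRECONDITION & SPEC =====
-- Pre_ excludes nonpositive slice_order_step with positive num_slices, on which A still returns:
-- there A's loop never resets and emits repeated (step 0) or negative-index (step < 0) groups —
-- an artefact of the implementation, not a slice order — while B's ranges naturally yield
-- nothing ([]). The other conjuncts are exactly A's own validations (A raises otherwise).
def Pre_calculate_correct_slice_order_legacy (num_slices : Int) (mb_factor : Int) (slice_order_step : Int) : Prop :=
  mb_factor = 3 ∧ PySem.Int.mod num_slices mb_factor = 0 ∧ (1 ≤ slice_order_step ∨ num_slices ≤ 0)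
instance (num_slices : Int) (mb_factor : Int) (slice_order_step : Int) : Decidable (Pre_calculate_correct_slice_order_legacy num_slices mb_factor slice_order_step) := by unfold Pre_calculate_correct_slice_order_legacy; infer_instance

def pvWitness_calculate_correct_slice_order_legacy : Int × Int × Int := (6, 3, 2)

def Spec_calculate_correct_slice_order_legacy (num_slices : Int) (mb_factor : Int) (slice_order_step : Int) (out : List (List Int)) : Prop := out = calculate_correct_slice_order_legacy_alt num_slices mb_factor slice_order_step
instance (num_slices : Int) (mb_factor : Int) (slice_order_step : Int) (out : List (List Int)) : Decidable (Spec_calculate_correct_slice_order_legacy num_slices mb_factor slice_order_step out) := by unfold Spec_calculate_correct_slice_order_legacy; infer_instance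

-- ===== CLAIM (what is proved, stated in full; the proofs are below) =====
def Claim_equal_calculate_correct_slice_order_legacy : Prop := ∀ (num_slices : Int) (mb_factor : Int) (slice_order_step : Int), Dom_calculate_correct_slice_order_legacy num_slices mb_factor slice_order_step → Pre_calculate_correct_slice_order_legacy num_slices mb_factor slice_order_step → Spec_calculate_correct_slice_order_legacy num_slices mb_factor slice_order_step (calculate_correct_slice_order_legacy num_slices mb_factor slice_order_step)

-- ===== LEMMAS AND PROOFS =====

-- the sequence of a_i values A emits after the first shot: fuel, k, a_i
def trajAfter (off t : Int) : Nat → Int → Int → List Int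
  | 0, _, _ => []
  | m+1, k, a =>
    if off ≤ a + t then (k+1) :: trajAfter off t m (k+1) (k+1)
    else (a+t) :: trajAfter off t m k (a+t)

-- B's a_i values contributed by the runs starting at s, s+1, …, t-1
def tailB (off t s : Int) : List Int :=
  (PySem.List.pyRange s t 1).flatMap (fun start => PySem.List.pyRange start off t)

theorem pyRange_pos_nil {a b s : Int} (hs : 0 < s) (hba : b ≤ a) :
    PySem.List.pyRange a b s = [] := by
  rw [PySem.List.pyRange_of_pos a b hs, if_neg (by omega)]
  simp

theorem pyRange_pos_cons {a b s : Int} (hs : 0 < s) (hab : a < b) :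
    PySem.List.pyRange a b s = a :: PySem.List.pyRange (a + s) b s := by
  rw [PySem.List.pyRange_of_pos a b hs, PySem.List.pyRange_of_pos (a + s) b hs, if_pos hab]
  have h1 : 1 ≤ (b - a + s - 1) / s := (Int.le_ediv_iff_mul_le hs).mpr (by omega)
  by_cases h2 : a + s < b
  · rw [if_pos h2]
    have hdiv : (b - (a + s) + s - 1) / s = (b - a + s - 1) / s - 1 := by
      have h := Int.add_mul_ediv_right (b - a + s - 1) (-1) (show s ≠ 0 by omega)
      have he : b - (a + s) + s - 1 = b - a + s - 1 + (-1) * s := by ring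
      rw [he, h]; ring
    rw [hdiv]
    obtain ⟨M, hM⟩ : ∃ M, ((b - a + s - 1) / s).toNat = M + 1 := ⟨((b - a + s - 1) / s).toNat - 1, by omega⟩
    have hM' : ((b - a + s - 1) / s - 1).toNat = M := by omega
    rw [hM, hM', List.range_succ_eq_map, List.map_cons, List.map_map]
    refine congrArg₂ _ (by simp) ?_
    refine List.map_congr_left ?_
    intro k _
    simp [Function.comp, Nat.succ_eq_add_one]
    ring
  · rw [if_neg h2]
    have h3 : (b - a + s - 1) / s < 2 := (Int.ediv_lt_iff_lt_mul hs).mpr (by omega)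
    have h4 : ((b - a + s - 1) / s).toNat = 1 := by omega
    rw [h4]
    simp


theorem nodup_pyRange_pos {a b s : Int} (hs : 0 < s) : (PySem.List.pyRange a b s).Nodup := by
  rw [PySem.List.pyRange_of_pos a b hs]
  refine List.Nodup.map ?_ (List.nodup_range)
  intro x y hxy
  have : (x : Int) = y := by
    have := sub_eq_zero.mpr hxy
    nlinarith [sub_eq_zero.mpr hxy]
  exact_mod_cast this

theorem tailB_nil {off t s : Int} (ht : 0 < t) (hoff : off ≤ 0) (hsn : 0 ≤ s) :
    tailB off t s = [] := by
  unfold tailB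
  rw [List.flatMap_eq_nil_iff]
  intro x hx
  exact pyRange_pos_nil ht (by have := (PySem.List.mem_pyRange_one).mp hx; omega)

theorem mem_tailB_zero {off t x : Int} (ht : 0 < t) :
    x ∈ tailB off t 0 ↔ 0 ≤ x ∧ x < off := by
  unfold tailB
  rw [List.mem_flatMap]
  constructor
  · rintro ⟨s, hs, hx⟩
    have h1 := PySem.List.mem_pyRange_one.mp hs
    have h2 := (PySem.List.mem_pyRange_iff_of_pos ht x).mp hx
    exact ⟨by omega, h2.2.1⟩
  · rintro ⟨hx0, hxoff⟩
    refine ⟨x % t, PySem.List.mem_pyRange_one.mpr ⟨Int.emod_nonneg x (by omega), Int.emod_lt_of_pos x ht⟩, ?_⟩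
    have hdm := Int.mul_ediv_add_emod x t
    have hq : 0 ≤ x / t := Int.ediv_nonneg hx0 (by omega)
    refine (PySem.List.mem_pyRange_iff_of_pos ht x).mpr ⟨?_, hxoff, ⟨x / t, by linarith⟩⟩
    nlinarith

theorem length_tailB_zero {off t : Int} (ht : 0 < t) (hoff : 0 < off) :
    (tailB off t 0).length = off.toNat := by
  have hnd : (tailB off t 0).Nodup := by
    unfold tailB
    rw [List.nodup_flatMap]
    refine ⟨fun x _ => nodup_pyRange_pos ht, ?_⟩
    refine List.Pairwise.imp_of_mem ?_ (PySem.List.pairwise_lt_pyRange_one 0 t)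
    intro s1 s2 hm1 hm2 hlt x hx1 hx2
    have hb1 := PySem.List.mem_pyRange_one.mp hm1
    have hb2 := PySem.List.mem_pyRange_one.mp hm2
    obtain ⟨_, _, c1, hc1⟩ := (PySem.List.mem_pyRange_iff_of_pos ht x).mp hx1
    obtain ⟨_, _, c2, hc2⟩ := (PySem.List.mem_pyRange_iff_of_pos ht x).mp hx2
    have hdv : t ∣ s2 - s1 := ⟨c1 - c2, by linarith [mul_sub t c1 c2]⟩
    have := Int.le_of_dvd (by omega) hdv
    omega
  have hperm : (tailB off t 0).Perm (PySem.List.pyRange 0 off 1) := by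
    rw [List.perm_ext_iff_of_nodup hnd (PySem.List.nodup_pyRange_one 0 off)]
    intro x
    rw [mem_tailB_zero ht, PySem.List.mem_pyRange_one]
  have := hperm.length_eq
  rw [this, PySem.List.length_pyRange_one]
  omega

theorem traj_eq (off t : Int) (ht : 1 ≤ t) : ∀ (m : Nat) (k a : Int), 0 ≤ k → k ≤ a → a < off →
    m = (PySem.List.pyRange (a + t) off t ++ tailB off t (k + 1)).length →
    trajAfter off t m k a = PySem.List.pyRange (a + t) off t ++ tailB off t (k + 1) := by
  intro m
  induction m with
  | zero =>
    intro k a _ _ _ hm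
    rw [trajAfter, List.length_eq_zero_iff.mp hm.symm]
  | succ m ih =>
    intro k a hk hka ha hm
    by_cases hc : off ≤ a + t
    · rw [pyRange_pos_nil (by omega) hc] at hm ⊢
      simp only [List.nil_append] at hm ⊢
      have hkt : k + 1 < t ∧ k + 1 < off := by
        by_contra hcon
        have : tailB off t (k + 1) = [] := by
          unfold tailB
          rcases not_and_or.mp hcon with h | h
          · rw [PySem.List.pyRange_one_eq_nil (by omega)]; rfl
          · rw [List.flatMap_eq_nil_iff]
            intro x hx
            have := PySem.List.mem_pyRange_one.mp hx
            exact pyRange_pos_nil (by omega) (by omega)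
        rw [this] at hm; simp at hm
      have hsplit : tailB off t (k + 1)
          = (k + 1) :: (PySem.List.pyRange (k + 1 + t) off t ++ tailB off t (k + 1 + 1)) := by
        unfold tailB
        rw [PySem.List.pyRange_one_cons hkt.1, List.flatMap_cons,
          pyRange_pos_cons (show (0:Int) < t by omega) hkt.2, List.cons_append]
      rw [trajAfter, if_pos hc, hsplit]
      congr 1
      rw [hsplit] at hm
      simp only [List.length_cons, List.length_append] at hm
      exact ih (k + 1) (k + 1) (by omega) le_rfl hkt.2
        (by simp only [List.length_append]; omega)
    · rw [trajAfter, if_neg hc]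
      rw [pyRange_pos_cons (show (0:Int) < t by omega) (by omega)] at hm ⊢
      rw [List.cons_append] at hm ⊢
      rw [ih k (a + t) hk (by omega) (by omega) (by simpa using hm)]

theorem foldA_rest (n mb t off lso : Int) (hn : n = 3 * off) (hlso : lso = 2 * off) :
    ∀ (xs : List Int), (∀ x ∈ xs, x ≠ 0) → ∀ (so : List (List Int)) (k a : Int),
    (xs.foldl (stepA n mb t off lso) (so, k, a)).1
      = so ++ (trajAfter off t xs.length k a).map (groupOf mb off) := by
  intro xs
  induction xs with
  | nil => intro _ so k a; simp [trajAfter]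
  | cons x xs ih =>
    intro hne so k a
    have hx : x ≠ 0 := hne x List.mem_cons_self
    rw [List.foldl_cons, List.length_cons]
    by_cases hc : off ≤ a + t
    · have hstep : stepA n mb t off lso (so, k, a) x = (so ++ [groupOf mb off (k+1)], k+1, k+1) := by
        simp only [stepA, if_neg hx, if_pos (show a + t + lso ≥ n by omega)]
        norm_num
      rw [hstep, ih (fun y hy => hne y (List.mem_cons_of_mem x hy))]
      rw [trajAfter, if_pos hc]
      simp
    · have hstep : stepA n mb t off lso (so, k, a) x = (so ++ [groupOf mb off (a+t)], k, a+t) := by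
        simp only [stepA, if_neg hx, if_neg (show ¬ (a + t + lso ≥ n) by omega)]
      rw [hstep, ih (fun y hy => hne y (List.mem_cons_of_mem x hy))]
      rw [trajAfter, if_neg hc]
      simp

-- ===== VERDICT (by name: the statement is the Claim_ definition above) =====
theorem calculate_correct_slice_order_legacy_spec : Claim_equal_calculate_correct_slice_order_legacy := by
  intro n mb t _ hpre
  obtain ⟨h3, hmod, htor⟩ := hpre
  subst h3
  have hdvd : (3 : Int) ∣ n := (PySem.Int.mod_eq_zero_iff_dvd n 3).mp hmod
  have hoffdef : PySem.Int.floordiv n 3 = n / 3 := PySem.Int.floordiv_eq_ediv_of_pos (by omega)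
  have hn3 : n = 3 * (n / 3) := (Int.mul_ediv_cancel' hdvd).symm
  unfold Spec_calculate_correct_slice_order_legacy
  unfold calculate_correct_slice_order_legacy calculate_correct_slice_order_legacy_alt
  simp only [hmod, hoffdef, ne_eq, not_true_eq_false, if_false,
    show ¬((3 : Int) ≤ 0) by omega, show ¬¬((3 : Int) = 3) by simp]
  set off := n / 3 with hoffeq
  have hB : (PySem.List.pyRange 0 t 1).flatMap
      (fun start => (PySem.List.pyRange start off t).map (fun a_i => groupOf 3 off a_i))
      = (tailB off t 0).map (groupOf 3 off) := by
    unfold tailB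
    rw [List.map_flatMap]
  rw [hB]
  by_cases hpos : 0 < off
  · have ht : 1 ≤ t := by rcases htor with h | h; exact h; omega
    rw [pyRange_pos_cons (show (0:Int) < 3 by omega) (show (0:Int) < n by omega), List.foldl_cons]
    have hstep0 : stepA n 3 t off ((3 - 1) * off) ([], 0, 0) 0
        = ([groupOf 3 off 0], 0, 0) := by
      have hc0 : ¬ (n ≤ 2 * off) := by omega
      simp [stepA, hc0]
    rw [hstep0, foldA_rest n 3 t off ((3 - 1) * off) hn3 (by ring) _
      (fun x hx => by
        have := (PySem.List.mem_pyRange_iff_of_pos (show (0:Int) < 3 by omega) x).mp hx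
        omega)]
    have hlen : (PySem.List.pyRange (0 + 3) n 3).length = off.toNat - 1 := by
      rw [PySem.List.pyRange_of_pos _ _ (show (0:Int) < 3 by omega),
        List.length_map, List.length_range]
      split_ifs <;> omega
    have hsplit0 : tailB off t 0
        = 0 :: (PySem.List.pyRange (0 + t) off t ++ tailB off t (0 + 1)) := by
      unfold tailB
      rw [PySem.List.pyRange_one_cons (show (0:Int) < t by omega), List.flatMap_cons,
        pyRange_pos_cons (show (0:Int) < t by omega) hpos, List.cons_append]
    have hlt := length_tailB_zero (show (0:Int) < t by omega) hpos
    rw [hsplit0] at hlt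
    simp only [List.length_cons, List.length_append] at hlt
    rw [hlen, traj_eq off t ht (off.toNat - 1) 0 0 le_rfl le_rfl hpos
      (by simp only [List.length_append]; omega)]
    rw [hsplit0, List.map_cons]
    rfl
  · rw [pyRange_pos_nil (show (0:Int) < 3 by omega) (show n ≤ 0 by omega)]
    by_cases hts : 0 < t
    · rw [tailB_nil hts (by omega) le_rfl]; rfl
    · unfold tailB
      rw [PySem.List.pyRange_one_eq_nil (by omega)]
      rfl
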